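-- pv_equiv track=rewrite | github.com/baxter-t/Practice | reverseFactorial.py | reverse_factorial
-- ===== SOURCE A (Python) =====
-- def reverse_factorial(num):
-- 	total = 1
-- 	count = 1
-- 	while total <= num :
-- 		if total == num:
-- 			return "" + str(count) + "!"
-- 		count += 1
-- 		total *= count
--
--
-- 	return "None"
-- ===== SOURCE B (Python) =====
-- def reverse_factorial(num):
--     if num < 1:
--         return "None"
--     count = 1
--     while num > 1:
--         count += 1
--         if num % count != 0:
--             return "None"
--         num //= count
--     return str(count) + "!"
-- ===== Notes on version B (the rewrite author's own statement) =====
-- stated objective: alternative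
-- what changed: B factors num by dividing out successively incremented counts, with an early exit on the first non-divisor, instead of A's building a running factorial product and comparing it for equality against num.
import Mathlib
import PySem

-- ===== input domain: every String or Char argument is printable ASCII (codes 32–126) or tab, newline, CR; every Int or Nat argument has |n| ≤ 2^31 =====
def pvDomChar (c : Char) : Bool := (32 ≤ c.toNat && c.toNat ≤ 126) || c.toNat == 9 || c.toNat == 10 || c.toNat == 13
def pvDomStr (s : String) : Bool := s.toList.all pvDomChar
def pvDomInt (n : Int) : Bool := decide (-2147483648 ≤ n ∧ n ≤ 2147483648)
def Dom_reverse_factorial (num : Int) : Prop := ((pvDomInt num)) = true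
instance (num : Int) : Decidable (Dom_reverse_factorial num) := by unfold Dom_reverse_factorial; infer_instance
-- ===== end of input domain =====

-- B replaces A's multiply-up-and-compare search by a divide-down factorisation of num; same results, different algorithm (objective: alternative).

-- ===== PORT A =====
-- while total <= num: if total == num: return "" + str(count) + "!"; count += 1; total *= count
-- (the bound hypotheses ht, hc only make the literal loop well-founded; they carry no extra logic)
def reverse_factorial_loopA (num total count : Int) (ht : 1 ≤ total) (hc : 1 ≤ count) : String :=
  if _h : total ≤ num then
    if total = num then "" ++ PySem.Int.toStr count ++ "!"
    else reverse_factorial_loopA num (total * (count + 1)) (count + 1)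
      (by nlinarith) (by omega)
  else "None"
termination_by (num - total).toNat
decreasing_by
  have h1 : total ≤ total * count := le_mul_of_one_le_right (by omega) hc
  have h2 : total * (count + 1) = total * count + total := by ring
  omega

def reverse_factorial (num : Int) : String :=
  reverse_factorial_loopA num 1 1 (by norm_num) (by norm_num)

-- ===== PORT B =====
-- while num > 1: count += 1; if num % count != 0: return "None"; num //= count
def reverse_factorial_loopB (num count : Int) (hc : 1 ≤ count) : String :=
  if _h : 1 < num then
    if PySem.Int.mod num (count + 1) ≠ 0 then "None"
    else reverse_factorial_loopB (PySem.Int.floordiv num (count + 1)) (count + 1) (by omega)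
  else PySem.Int.toStr count ++ "!"
termination_by num.toNat
decreasing_by
  have h1 : PySem.Int.floordiv num (count + 1) < num := by
    rw [PySem.Int.floordiv_lt_iff_lt_mul (by omega)]; nlinarith
  omega

def reverse_factorial_alt (num : Int) : String :=
  if num < 1 then "None"
  else reverse_factorial_loopB num 1 (by norm_num)

-- ===== PRECONDITION & SPEC =====
def Spec_reverse_factorial (num : Int) (out : String) : Prop := out = reverse_factorial_alt num
instance (num : Int) (out : String) : Decidable (Spec_reverse_factorial num out) := by unfold Spec_reverse_factorial; infer_instance

-- ===== CLAIM (what is proved, stated in full; the proofs are below) =====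
def Claim_equal_reverse_factorial : Prop := ∀ (num : Int), Dom_reverse_factorial num → Spec_reverse_factorial num (reverse_factorial num)

-- ===== LEMMAS AND PROOFS =====

-- if num is no factorial beyond stage j, A's loop from stage j returns "None"
theorem rf_loopA_none : ∀ (n : Nat) (num total count : Int) (ht : 1 ≤ total) (hc : 1 ≤ count),
    (num - total).toNat ≤ n → ∀ (j : Nat), 1 ≤ j → total = (Nat.factorial j : Int) → count = (j : Int) →
    (∀ k, j ≤ k → (Nat.factorial k : Int) ≠ num) →
    reverse_factorial_loopA num total count ht hc = "None" := by
  intro n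
  induction n with
  | zero =>
    intro num total count ht hc hm j hj htj hcj hmiss
    rw [reverse_factorial_loopA]
    have : ¬ total ≤ num := by
      intro hle
      have := hmiss j le_rfl
      omega
    simp [this]
  | succ m ih =>
    intro num total count ht hc hm j hj htj hcj hmiss
    rw [reverse_factorial_loopA]
    by_cases hle : total ≤ num
    · have hne : total ≠ num := by have := hmiss j le_rfl; omega
      simp only [hle, dite_true, hne, if_false]
      have hmeas : (num - total * (count + 1)).toNat ≤ m := by
        have h1 : total ≤ total * count := le_mul_of_one_le_right (by omega) hc
        have h2 : total * (count + 1) = total * count + total := by ring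
        omega
      have hfac : total * (count + 1) = (Nat.factorial (j + 1) : Int) := by
        push_cast [Nat.factorial_succ]; rw [htj, hcj]; ring
      have hcnt : count + 1 = ((j + 1 : Nat) : Int) := by push_cast; omega
      exact ih num (total * (count + 1)) (count + 1) _ _ hmeas (j + 1) (by omega) hfac hcnt
        (fun k hk => hmiss k (by omega))
    · simp [hle]

-- joint simulation: A's loop at state (total = j!, count = j) on input total * nb
-- computes the same string as B's loop at state (nb, count = j)
theorem rf_main : ∀ (n : Nat) (nb : Int), nb.toNat ≤ n →
    ∀ (na total count : Int) (ht : 1 ≤ total) (hc : 1 ≤ count) (hcB : 1 ≤ count),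
    1 ≤ nb → na = total * nb →
    ∀ (j : Nat), 1 ≤ j → total = (Nat.factorial j : Int) → count = (j : Int) →
    reverse_factorial_loopA na total count ht hc = reverse_factorial_loopB nb count hcB := by
  intro n
  induction n with
  | zero =>
    intro nb hm na total count ht hc hcB hnb hna j hj htj hcj
    -- nb.toNat ≤ 0 and 1 ≤ nb force nb = 0 impossible; actually nb ≥ 1 → toNat ≥ 1
    omega
  | succ m ih =>
    intro nb hm na total count ht hc hcB hnb hna j hj htj hcj
    rw [reverse_factorial_loopB]
    by_cases hgt : 1 < nb
    · simp only [hgt, dite_true]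
      by_cases hdvd : PySem.Int.mod nb (count + 1) = 0
      · -- divisible: both loops advance
        simp only [hdvd, ne_eq, not_true_eq_false, if_false]
        have hdvd' : (count + 1) ∣ nb := (PySem.Int.mod_eq_zero_iff_dvd nb (count + 1)).mp hdvd
        have hcpos : (0 : Int) < count + 1 := by omega
        have hq : PySem.Int.floordiv nb (count + 1) = nb / (count + 1) :=
          PySem.Int.floordiv_eq_ediv_of_pos hcpos
        have hmul : nb / (count + 1) * (count + 1) = nb := Int.ediv_mul_cancel hdvd'
        have hq1 : 1 ≤ nb / (count + 1) := by
          have hle : count + 1 ≤ nb := Int.le_of_dvd (by omega) hdvd'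
          have := Int.ediv_le_ediv hcpos hle
          simpa [Int.ediv_self (by omega : (count + 1) ≠ 0)] using this
        rw [reverse_factorial_loopA]
        have hle : total ≤ na := by rw [hna]; exact le_mul_of_one_le_right (by omega) hnb
        have hne : total ≠ na := by
          rw [hna]; intro h
          have h2 : total * 1 = total * nb := by omega
          have := mul_left_cancel₀ (by omega : total ≠ 0) h2
          omega
        simp only [hle, dite_true, hne, if_false]
        rw [hq]
        obtain ⟨q, hqq⟩ := hdvd'
        have hqe : nb / (count + 1) = q := by
          rw [hqq]; exact Int.mul_ediv_cancel_left _ (by omega)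
        rw [hqe]
        have hfuel : q.toNat ≤ m := by
          have hlt : nb / (count + 1) < nb := by
            rw [Int.ediv_lt_iff_lt_mul hcpos]; nlinarith
          omega
        have hq1' : 1 ≤ q := by omega
        have hna' : na = (total * (count + 1)) * q := by rw [hna, hqq]; ring
        have hfac : total * (count + 1) = (Nat.factorial (j + 1) : Int) := by
          push_cast [Nat.factorial_succ]; rw [htj, hcj]; ring
        have hcnt : count + 1 = ((j + 1 : Nat) : Int) := by push_cast; omega
        have ht' : 1 ≤ total * (count + 1) := by nlinarith
        exact ih q hfuel na (total * (count + 1)) (count + 1) ht' (by omega)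
          (by omega) hq1' hna' (j + 1) (by omega) hfac hcnt
      · -- not divisible: B returns "None", A never hits num
        simp only [hdvd, ne_eq, not_false_eq_true, if_true]
        apply rf_loopA_none (na - total).toNat na total count ht hc le_rfl j hj htj hcj
        intro k hk hkeq
        rcases Nat.eq_or_lt_of_le hk with heq | hlt
        · subst heq
          rw [hna, ← htj] at hkeq
          have h2 : total * 1 = total * nb := by omega
          have := mul_left_cancel₀ (by omega : total ≠ 0) h2
          omega
        · -- j < k: (j+1)! divides k!, so (count+1) ∣ nb, contradiction
          have hd : Nat.factorial (j + 1) ∣ Nat.factorial k := Nat.factorial_dvd_factorial (by omega)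
          obtain ⟨t, hterm⟩ := hd
          have hterm' : (Nat.factorial k : Int) = (Nat.factorial (j + 1) : Int) * (t : Int) := by
            exact_mod_cast hterm
          have hkeq' : (Nat.factorial (j + 1) : Int) * (t : Int) = total * nb := by
            rw [hterm', hna] at hkeq; exact hkeq
          have hfs : (Nat.factorial (j + 1) : Int) = (count + 1) * total := by
            push_cast [Nat.factorial_succ]; rw [htj, hcj]
          have hnb' : nb = (count + 1) * (t : Int) := by
            rw [hfs] at hkeq'
            have h2 : total * ((count + 1) * (t : Int)) = total * nb := by linear_combination hkeq'
            exact (mul_left_cancel₀ (by omega : total ≠ 0) h2).symm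
          exact hdvd ((PySem.Int.mod_eq_zero_iff_dvd nb (count + 1)).mpr ⟨(t : Int), hnb'⟩)
    · -- nb = 1: both return str(count) + "!"
      have hnb1 : nb = 1 := by omega
      simp only [hgt, dite_false]
      rw [reverse_factorial_loopA]
      have heq : total = na := by rw [hna, hnb1]; ring
      simp [← heq]

-- ===== VERDICT (by name: the statement is the Claim_ definition above) =====
theorem reverse_factorial_spec : Claim_equal_reverse_factorial := by
  intro num _
  unfold Spec_reverse_factorial reverse_factorial reverse_factorial_alt
  by_cases hlt : num < 1
  · rw [reverse_factorial_loopA]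
    simp [hlt, show ¬ (1 : Int) ≤ num by omega]
  · simp only [hlt, if_false]
    apply rf_main num.toNat num le_rfl num 1 1 _ _ _ (by omega) (by ring) 1 le_rfl
    · norm_num [Nat.factorial]
    · norm_num
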